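-- pv_equiv track=rewrite | github.com/terror/solutions | binarysearch/fibonacci-subset-sum.py | solve
-- ===== SOURCE A (Python) =====
-- def solve(n):
--  terms = [0, 1, 1]
--
--  while terms[-1] < n:
--    terms.append(terms[-1] + terms[-2])
--
--  ans, term = 0, len(terms) - 1
--
--  while n > 0:
--    ans, n, term = ans + n // terms[term], n % terms[term], term - 1
--
--  return ans
-- ===== SOURCE B (Python) =====
-- def solve(n):
--     if n <= 0:
--         return 0
--     a, b = 1, 2
--     while b <= n:
--         a, b = b, a + b
--     return 1 + solve(n - a)
-- ===== Notes on version B (the rewrite author's own statement) =====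
-- stated objective: simpler
-- what changed: Replaces A's two staged loops (building a Fibonacci table, then a division-based descent with floor-division and modulo) by a subtraction-only recursion with no table and no division: each call climbs a rolling pair to the largest Fibonacci number not exceeding n, subtracts it, and recurses; correct because every quotient in A's greedy descent is at most one, so A's count equals the number of greedy subtractions.
import Mathlib
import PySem

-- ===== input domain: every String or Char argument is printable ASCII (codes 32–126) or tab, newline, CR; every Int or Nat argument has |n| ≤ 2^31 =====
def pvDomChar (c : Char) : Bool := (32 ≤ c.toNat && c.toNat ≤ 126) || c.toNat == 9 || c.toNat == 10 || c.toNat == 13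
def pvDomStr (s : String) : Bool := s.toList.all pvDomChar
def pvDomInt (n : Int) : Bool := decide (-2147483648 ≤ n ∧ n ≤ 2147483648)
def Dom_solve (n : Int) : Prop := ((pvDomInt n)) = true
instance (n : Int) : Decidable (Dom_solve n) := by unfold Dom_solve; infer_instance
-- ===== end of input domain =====

-- B replaces A's Fibonacci table and division-based greedy descent by a subtraction-only
-- recursion (climb to the largest Fibonacci ≤ n, subtract, recurse). Objective: simpler.

-- ===== PORT A =====
-- the fuel arguments are totality guards only; 100 iterations suffice for every |n| ≤ 2^31
def buildA : Nat → Int → List Int → List Int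
  | 0, _, terms => terms
  | fuel+1, n, terms =>
    if (PySem.List.pyGet? terms (-1)).getD 0 < n then
      buildA fuel n (terms ++ [(PySem.List.pyGet? terms (-1)).getD 0 + (PySem.List.pyGet? terms (-2)).getD 0])
    else terms

def descA : Nat → List Int → Int → Int → Int → Int
  | 0, _, ans, _, _ => ans
  | fuel+1, terms, ans, n, term =>
    if n > 0 then
      descA fuel terms (ans + PySem.Int.floordiv n ((PySem.List.pyGet? terms term).getD 0))
        (PySem.Int.mod n ((PySem.List.pyGet? terms term).getD 0)) (term - 1)
    else ans

def solve (n : Int) : Int :=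
  let terms := buildA 100 n [0, 1, 1]
  descA 100 terms 0 n ((terms.length : Int) - 1)

-- ===== PORT B =====
-- the fuel arguments are totality guards only; within |n| ≤ 2^31 they are never exhausted
def climbB : Nat → Int → Int × Int → Int × Int
  | 0, _, p => p
  | fuel+1, n, (a, b) => if b ≤ n then climbB fuel n (b, a + b) else (a, b)

def solveB : Nat → Int → Int
  | 0, _ => 0
  | fuel+1, n =>
    if n ≤ 0 then 0
    else
      let p := climbB 100 n (1, 2)
      1 + solveB fuel (n - p.1)

def solve_alt (n : Int) : Int := solveB 100 n

-- ===== PRECONDITION & SPEC =====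
def Spec_solve (n : Int) (out : Int) : Prop := out = solve_alt n
instance (n : Int) (out : Int) : Decidable (Spec_solve n out) := by unfold Spec_solve; infer_instance

-- ===== CLAIM =====
def Claim_equal_solve : Prop := ∀ (n : Int), Dom_solve n → Spec_solve n (solve n)

-- ===== LEMMAS AND PROOFS =====
def fibI : Nat → Int
  | 0 => 0
  | 1 => 1
  | k+2 => fibI k + fibI (k+1)

def fibList (k : Nat) : List Int := (List.range k).map fibI

theorem fibList_length (k : Nat) : (fibList k).length = k := by
  simp [fibList]

theorem fibList_get (k i : Nat) (h : i < k) : (fibList k)[i]? = some (fibI i) := by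
  simp [fibList, h]

theorem fibList_last (k : Nat) (h : 1 ≤ k) :
    (PySem.List.pyGet? (fibList k) (-1)).getD 0 = fibI (k - 1) := by
  rw [PySem.List.pyGet?_neg_ofNat _ 1 (by omega) (by rw [fibList_length]; omega)]
  rw [fibList_length, fibList_get k (k-1) (by omega)]
  rfl

theorem fibList_penult (k : Nat) (h : 2 ≤ k) :
    (PySem.List.pyGet? (fibList k) (-2)).getD 0 = fibI (k - 2) := by
  rw [PySem.List.pyGet?_neg_ofNat _ 2 (by omega) (by rw [fibList_length]; omega)]
  rw [fibList_length, fibList_get k (k-2) (by omega)]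
  rfl

theorem fibList_succ (k : Nat) (h : 2 ≤ k) :
    fibList k ++ [fibI (k - 1) + fibI (k - 2)] = fibList (k + 1) := by
  have : fibI (k - 1) + fibI (k - 2) = fibI k := by
    obtain ⟨j, rfl⟩ : ∃ j, k = j + 2 := ⟨k - 2, by omega⟩
    simp [fibI]; ring
  rw [this, fibList, fibList, List.range_succ, List.map_append]
  rfl

theorem fibList_three : fibList 3 = [0, 1, 1] := by decide

theorem fibI_nonneg (k : Nat) : 0 ≤ fibI k := by
  induction k using Nat.strong_induction_on with
  | _ k ih =>
    match k with
    | 0 => decide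
    | 1 => decide
    | j+2 =>
      have h1 := ih j (by omega)
      have h2 := ih (j+1) (by omega)
      show 0 ≤ fibI j + fibI (j+1)
      omega

theorem fibI_pos (k : Nat) (h : 1 ≤ k) : 0 < fibI k := by
  induction k using Nat.strong_induction_on with
  | _ k ih =>
    match k, h with
    | 1, _ => decide
    | 2, _ => decide
    | (j+3), _ =>
      have h1 := ih (j+1) (by omega) (by omega)
      have h2 := ih (j+2) (by omega) (by omega)
      show 0 < fibI (j+1) + fibI (j+2)
      omega

theorem fibI_step (k : Nat) : fibI k ≤ fibI (k+1) := by
  match k with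
  | 0 => decide
  | j+1 =>
    have := fibI_nonneg j
    show fibI (j+1) ≤ fibI j + fibI (j+1)
    omega

theorem fibI_mono {j k : Nat} (h : j ≤ k) : fibI j ≤ fibI k := by
  induction k with
  | zero =>
    have hj : j = 0 := by omega
    subst hj; exact le_rfl
  | succ k ih =>
    rcases Nat.lt_or_ge j (k+1) with h' | h'
    · exact le_trans (ih (by omega)) (fibI_step k)
    · have hj : j = k + 1 := by omega
      subst hj; exact le_rfl

theorem fibI_strict (k : Nat) (h : 2 ≤ k) : fibI k < fibI (k+1) := by
  obtain ⟨j, rfl⟩ : ∃ j, k = j + 2 := ⟨k - 2, by omega⟩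
  have := fibI_pos (j+1) (by omega)
  have : fibI (j+2) < fibI (j+1) + fibI (j+2) := by omega
  calc fibI (j+2) < fibI (j+1) + fibI (j+2) := this
    _ = fibI (j+3) := rfl

-- linear-time pair evaluation of fibI, to get the literal value of fibI 47
def fibP : Nat → Int × Int
  | 0 => (0, 1)
  | k+1 => ((fibP k).2, (fibP k).1 + (fibP k).2)

theorem fibP_eq (k : Nat) : fibP k = (fibI k, fibI (k+1)) := by
  induction k with
  | zero => decide
  | succ k ih => rw [fibP, ih]; simp [fibI]

theorem fibI_47 : fibI 47 = 2971215073 := by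
  have h := fibP_eq 47
  have : (fibP 47).1 = 2971215073 := by decide
  rw [h] at this
  exact this

-- the build loop ends with fibList m whose last entry is ≥ n; if a step was taken,
-- the penultimate entry at that moment was < n
theorem buildA_spec (n : Int) : ∀ fuel k, 3 ≤ k → n ≤ fibI (fuel + k - 1) →
    ∃ m, 3 ≤ m ∧ buildA fuel n (fibList k) = fibList m ∧ n ≤ fibI (m - 1) ∧
      (m = k ∨ fibI (m - 2) < n) := by
  intro fuel
  induction fuel with
  | zero =>
    intro k hk hb
    exact ⟨k, hk, rfl, by simpa using hb, Or.inl rfl⟩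
  | succ fuel ih =>
    intro k hk hb
    rw [buildA, fibList_last k (by omega), fibList_penult k (by omega)]
    by_cases hlt : fibI (k - 1) < n
    · simp only [if_pos hlt, fibList_succ k (by omega)]
      obtain ⟨m, hm3, heq, hle, hd⟩ := ih (k + 1) (by omega) (by
        have : fuel + (k + 1) - 1 = (fuel + 1) + k - 1 := by omega
        rw [this]; exact hb)
      refine ⟨m, hm3, heq, hle, Or.inr ?_⟩
      rcases hd with h | h
      · subst h
        have : k + 1 - 2 = k - 1 := by omega
        rw [this]; exact hlt
      · exact h
    · simp only [if_neg hlt]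
      exact ⟨k, hk, rfl, by omega, Or.inl rfl⟩

-- the climb reaches the bracketing pair (fibI k, fibI (k+1)) around n
theorem climbB_spec (n : Int) : ∀ fuel j k, 2 ≤ j → j ≤ k → k ≤ fuel + j →
    fibI j ≤ n → fibI k ≤ n → n < fibI (k+1) →
    climbB fuel n (fibI j, fibI (j+1)) = (fibI k, fibI (k+1)) := by
  intro fuel
  induction fuel with
  | zero =>
    intro j k _ hjk hkf _ _ _
    have : j = k := by omega
    subst this; rfl
  | succ fuel ih =>
    intro j k hj hjk hkf hjn hkn hnk
    rw [climbB]
    by_cases hstep : fibI (j+1) ≤ n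
    · have hjk' : j < k := by
        rcases Nat.lt_or_ge j k with h | h
        · exact h
        · exfalso; have : j = k := by omega
          subst this; omega
      simp only [if_pos hstep]
      have : fibI j + fibI (j+1) = fibI (j+2) := by simp [fibI]
      rw [this]
      exact ih (j+1) k (by omega) (by omega) (by omega) hstep hkn hnk
    · simp only [if_neg hstep]
      have : j = k := by
        by_contra hne
        have hlt : j < k := by omega
        have : fibI (j+1) ≤ fibI k := fibI_mono (by omega)
        omega
      subst this; rfl

theorem descA_stop (fuel : Nat) (terms : List Int) (ans term n : Int) (hn : ¬ n > 0) :
    descA fuel terms ans n term = ans := by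
  cases fuel with
  | zero => rfl
  | succ f => rw [descA]; simp [hn]

theorem solveB_zero (fuel : Nat) : solveB fuel 0 = 0 := by
  cases fuel with
  | zero => rfl
  | succ f => rw [solveB]; simp

theorem fibList_idx (m k : Nat) (h : k < m) :
    (PySem.List.pyGet? (fibList m) (k : Int)).getD 0 = fibI k := by
  rw [PySem.List.pyGet?_natCast, fibList_get m k h]; rfl

-- the greedy division descent counts exactly the greedy subtractions
theorem desc_eq (m : Nat) : ∀ fuelA k fuelB (ans n : Int), 2 ≤ k → k < m →
    k ≤ fuelA → k ≤ fuelB → k ≤ 100 → 0 ≤ n → n < fibI (k+1) →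
    descA fuelA (fibList m) ans n (k : Int) = ans + solveB fuelB n := by
  intro fuelA
  induction fuelA with
  | zero => intro k _ _ _ hk _ hf; omega
  | succ fuelA ih =>
    intro k fuelB ans n hk hkm hfA hfB h100 hn0 hnk
    obtain ⟨fB, rfl⟩ : ∃ f, fuelB = f + 1 := ⟨fuelB - 1, by omega⟩
    by_cases hpos : n > 0
    · rw [descA]
      simp only [if_pos hpos]
      rw [fibList_idx m k (by omega)]
      have hfkpos : 0 < fibI k := fibI_pos k (by omega)
      rw [solveB]
      simp only [if_neg (by omega : ¬ n ≤ 0)]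
      by_cases hge : fibI k ≤ n
      · -- quotient 1: A takes fibI k by division, B subtracts it after climbing
        have hfib2 : fibI k + fibI (k-1) = fibI (k+1) := by
          obtain ⟨j, rfl⟩ : ∃ j, k = j + 2 := ⟨k - 2, by omega⟩
          simp [fibI]; ring
        have hq : PySem.Int.floordiv n (fibI k) = 1 := by
          rw [PySem.Int.floordiv_eq_iff_of_pos hfkpos]
          constructor
          · omega
          · have := fibI_mono (show k - 1 ≤ k by omega)
            omega
        have hr : PySem.Int.mod n (fibI k) = n - fibI k := by
          have := PySem.Int.floordiv_mul_add_mod n (fibI k)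
          rw [hq] at this; omega
        have hclimb : climbB 100 n (1, 2) = (fibI k, fibI (k+1)) := by
          have h12 : ((1 : Int), (2 : Int)) = (fibI 2, fibI 3) := by decide
          rw [h12]
          exact climbB_spec n 100 2 k (by omega) hk (by omega) (by
            have : fibI 2 = 1 := by decide
            omega) hge hnk
        rw [hq, hr, hclimb]
        have hrlt : n - fibI k < fibI (k - 1) := by omega
        by_cases hk3 : 3 ≤ k
        · have hcast : (k : Int) - 1 = ((k - 1 : Nat) : Int) := by omega
          rw [hcast, ih (k-1) fB (ans + 1) (n - fibI k) (by omega) (by omega)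
            (by omega) (by omega) (by omega) (by omega) (by
              have : k - 1 + 1 = k := by omega
              rw [this]
              have := fibI_mono (show k - 1 ≤ k by omega)
              omega)]
          ring
        · -- k = 2: remainder is 0, both sides stop
          have hk2 : k = 2 := by omega
          subst hk2
          have hr0 : n - fibI 2 = 0 := by
            have h1 : fibI (2 - 1) = (1 : Int) := by decide
            omega
          rw [hr0, descA_stop _ _ _ _ _ (by omega : ¬ (0:Int) > 0), solveB_zero]
          ring
      · -- quotient 0: A moves to the next smaller divisor, B is unchanged
        have hk3 : 3 ≤ k := by
          by_contra h
          have hk2 : k = 2 := by omega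
          subst hk2
          have : fibI 2 = 1 := by decide
          omega
        have hq : PySem.Int.floordiv n (fibI k) = 0 := by
          rw [PySem.Int.floordiv_eq_iff_of_pos hfkpos]
          constructor
          · omega
          · omega
        have hr : PySem.Int.mod n (fibI k) = n := by
          have := PySem.Int.floordiv_mul_add_mod n (fibI k)
          rw [hq] at this; omega
        rw [hq, hr]
        have hcast : (k : Int) - 1 = ((k - 1 : Nat) : Int) := by omega
        rw [hcast, ih (k-1) (fB+1) (ans + 0) n (by omega) (by omega) (by omega)
          (by omega) (by omega) hn0 (by
            have : k - 1 + 1 = k := by omega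
            rw [this]; omega)]
        rw [solveB]
        simp only [if_neg (by omega : ¬ n ≤ 0)]
        ring
    · rw [descA_stop _ _ _ _ _ hpos, solveB]
      simp only [if_pos (by omega : n ≤ 0)]
      ring

-- ===== VERDICT =====
theorem solve_spec : Claim_equal_solve := by
  intro n hDom
  unfold Spec_solve solve solve_alt
  have hdom : n ≤ 2147483648 := by
    unfold Dom_solve pvDomInt at hDom
    exact (of_decide_eq_true hDom).2
  have hn47 : n ≤ fibI 47 := by rw [fibI_47]; omega
  have hb : n ≤ fibI (100 + 3 - 1) := le_trans hn47 (fibI_mono (by omega))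
  rw [show ([0, 1, 1] : List Int) = fibList 3 from fibList_three.symm]
  obtain ⟨m, hm3, heq, hle, hd⟩ := buildA_spec n 100 3 (by omega) hb
  rw [heq]
  show descA 100 (fibList m) 0 n (((fibList m).length : Int) - 1) = solveB 100 n
  rw [fibList_length]
  by_cases hpos : n > 0
  · have hm100 : m - 1 ≤ 100 := by
      rcases hd with h | h
      · omega
      · by_contra hc
        have : fibI 47 ≤ fibI (m - 2) := fibI_mono (by omega)
        omega
    have hcast : (m : Int) - 1 = ((m - 1 : Nat) : Int) := by omega
    have hnm : n < fibI ((m - 1) + 1) := by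
      have hs := fibI_strict (m-1) (by omega)
      omega
    rw [hcast, desc_eq m 100 (m-1) 100 0 n (by omega) (by omega) (by omega)
      (by omega) hm100 (by omega) hnm]
    ring
  · rw [descA_stop _ _ _ _ _ hpos]
    have hn0 : n ≤ 0 := by omega
    rw [solveB]
    simp [hn0]
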